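-- pv_equiv track=rewrite | github.com/sebarios92/UTN-TUPaD-P1 | 04 Estructuras Repetitivas/trabajo practico n°4/Rios Sebastian TP.N°4.py | analizar_numeros
-- ===== SOURCE A (Python) =====
-- def analizar_numeros(numeros):#analizamos una lista de numeros
--     pares = 0
--     impares = 0
--     positivos = 0
--     negativos = 0
--
--     for numero in numeros:
--         if numero % 2 == 0:
--             pares += 1
--         else:
--             impares += 1
--
--         if numero > 0:
--             positivos += 1
--         elif numero < 0:
--             negativos += 1
--
--     return {
--         "pares": pares,
--         "impares": impares,
--         "positivos": positivos,
--         "negativos": negativos,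
--     }
-- ===== SOURCE B (Python) =====
-- def analizar_numeros(numeros):
--     # Four independent single-purpose passes instead of one combined loop.
--     pares = sum(1 for n in numeros if n % 2 == 0)
--     impares = sum(1 for n in numeros if n % 2 != 0)
--     positivos = sum(1 for n in numeros if n > 0)
--     negativos = sum(1 for n in numeros if n < 0)
--     return {
--         "pares": pares,
--         "impares": impares,
--         "positivos": positivos,
--         "negativos": negativos,
--     }
-- ===== Notes on version B (the rewrite author's own statement) =====
-- stated objective: simpler
-- what changed: Replaces the single loop maintaining four accumulators with four independent generator-expression passes, one per count.
import Mathlib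
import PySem

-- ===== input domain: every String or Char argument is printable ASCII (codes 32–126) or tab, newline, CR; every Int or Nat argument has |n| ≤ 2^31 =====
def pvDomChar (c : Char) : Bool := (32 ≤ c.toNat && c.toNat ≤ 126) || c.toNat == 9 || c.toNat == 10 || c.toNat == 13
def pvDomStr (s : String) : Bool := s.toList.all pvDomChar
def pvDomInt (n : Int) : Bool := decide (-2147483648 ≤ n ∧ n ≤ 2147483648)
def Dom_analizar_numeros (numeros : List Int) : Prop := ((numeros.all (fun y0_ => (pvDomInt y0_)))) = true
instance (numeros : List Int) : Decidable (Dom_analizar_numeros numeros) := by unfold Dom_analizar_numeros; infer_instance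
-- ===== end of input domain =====

-- B replaces A's single four-accumulator loop with four independent one-condition passes (simpler decomposition).


-- ===== PORT A =====
-- one pass over the list, updating four accumulators exactly as A's loop body does
def analizar_numeros (numeros : List Int) : List (String × Int) :=
  let st := numeros.foldl
    (fun (acc : Int × Int × Int × Int) numero =>
      let (pares, impares, positivos, negativos) := acc
      let (pares, impares) :=
        if PySem.Int.mod numero 2 = 0 then (pares + 1, impares) else (pares, impares + 1)
      let (positivos, negativos) :=
        if numero > 0 then (positivos + 1, negativos)
        else if numero < 0 then (positivos, negativos + 1)
        else (positivos, negativos)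
      (pares, impares, positivos, negativos))
    (0, 0, 0, 0)
  [("pares", st.1), ("impares", st.2.1), ("positivos", st.2.2.1), ("negativos", st.2.2.2)]

-- ===== PORT B =====
-- four independent passes, one per count (sum(1 for n in numeros if cond) = countP cond)
def analizar_numeros_alt (numeros : List Int) : List (String × Int) :=
  let pares : Int := numeros.countP (fun n => PySem.Int.mod n 2 == 0)
  let impares : Int := numeros.countP (fun n => PySem.Int.mod n 2 != 0)
  let positivos : Int := numeros.countP (fun n => n > 0)
  let negativos : Int := numeros.countP (fun n => n < 0)
  [("pares", pares), ("impares", impares), ("positivos", positivos), ("negativos", negativos)]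

-- ===== PRECONDITION & SPEC =====
def Spec_analizar_numeros (numeros : List Int) (out : List (String × Int)) : Prop := out = analizar_numeros_alt numeros
instance (numeros : List Int) (out : List (String × Int)) : Decidable (Spec_analizar_numeros numeros out) := by unfold Spec_analizar_numeros; infer_instance

-- ===== CLAIM (what is proved, stated in full; the proofs are below) =====
def Claim_equal_analizar_numeros : Prop := ∀ (numeros : List Int), Dom_analizar_numeros numeros → Spec_analizar_numeros numeros (analizar_numeros numeros)

-- ===== LEMMAS AND PROOFS =====

-- invariant: the fold of A's loop body starting from any state adds the four condition-counts componentwise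
theorem analizar_loop_counts (numeros : List Int) (p i pos neg : Int) :
    numeros.foldl
      (fun (acc : Int × Int × Int × Int) numero =>
        let (pares, impares, positivos, negativos) := acc
        let (pares, impares) :=
          if PySem.Int.mod numero 2 = 0 then (pares + 1, impares) else (pares, impares + 1)
        let (positivos, negativos) :=
          if numero > 0 then (positivos + 1, negativos)
          else if numero < 0 then (positivos, negativos + 1)
          else (positivos, negativos)
        (pares, impares, positivos, negativos))
      (p, i, pos, neg)
    = (p + numeros.countP (fun n => PySem.Int.mod n 2 == 0),
       i + numeros.countP (fun n => PySem.Int.mod n 2 != 0),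
       pos + numeros.countP (fun n => n > 0),
       neg + numeros.countP (fun n => n < 0)) := by
  induction numeros generalizing p i pos neg with
  | nil => simp
  | cons x xs ih =>
    simp only [PySem.Int.mod] at ih ⊢
    simp only [List.foldl_cons, List.countP_cons]
    by_cases hm : x.fmod 2 = 0 <;> by_cases hp : x > 0 <;> by_cases hn : x < 0 <;>
      simp [hm, hp, hn, ih]
    all_goals omega

-- ===== VERDICT (by name: the statement is the Claim_ definition above) =====
theorem analizar_numeros_spec : Claim_equal_analizar_numeros := by
  intro numeros _
  unfold Spec_analizar_numeros analizar_numeros analizar_numeros_alt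
  rw [analizar_loop_counts]
  simp
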